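-- pv_equiv track=rewrite | github.com/D-marina/CommutativeMonoids | ClassCSemigroup/CharacterizingAffineCSemigroup.py | EqRay
-- ===== SOURCE A (Python) =====
-- def ProdEsc(v1,v2):
--     n = len(v1)
--     suma = 0
--     for i in range(n):
--         suma = suma + v1[i] * v2[i]
--     return suma
--
-- def EqRay(ray,x):
--     n = len(ray)
--     eq = []
--     for j in range(1,n):
--         aux = []
--         aux = aux + [-ray[j]]                 # Valor -aj
--         aux = aux + [0 for k in range(j-1)]   # Ceros intermediso
--         aux = aux + [ray[0]]                  # Vaor ai
--         aux = aux + [0 for k in range(n-j-1)] # Ceros finales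
--         eq.append(aux)
--     # Calibramos las ecuaciones
--     for i in range(len(eq)):
--         calibre = ProdEsc(eq[i],x)
--         if calibre < 0:
--             for j in range(len(eq[i])):
--                 eq[i][j] = -eq[i][j]
--     return eq
-- ===== SOURCE B (Python) =====
-- def EqRay(ray, x):
--     # Single build pass: the dot product of row j with x reduces to
--     # ray[0]*x[j] - ray[j]*x[0], so each row is emitted already calibrated.
--     n = len(ray)
--     eq = []
--     for j in range(1, n):
--         s = ray[0] * x[j] - ray[j] * x[0]
--         if s < 0:
--             eq.append([ray[j]] + [0] * (j - 1) + [-ray[0]] + [0] * (n - j - 1))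
--         else:
--             eq.append([-ray[j]] + [0] * (j - 1) + [ray[0]] + [0] * (n - j - 1))
--     return eq
-- ===== Notes on version B (the rewrite author's own statement) =====
-- stated objective: faster
-- what changed: B fuses A's two passes into one: instead of building each raw row and then running a second calibration loop that recomputes a full O(n) dot product (ProdEsc) per row and negates rows in place, B computes the calibration sign directly as ray[0]*x[j] - ray[j]*x[0] (the only two nonzero terms of that dot product) and emits each row already with the correct orientation, dropping ProdEsc and the whole second loop.
import Mathlib
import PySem

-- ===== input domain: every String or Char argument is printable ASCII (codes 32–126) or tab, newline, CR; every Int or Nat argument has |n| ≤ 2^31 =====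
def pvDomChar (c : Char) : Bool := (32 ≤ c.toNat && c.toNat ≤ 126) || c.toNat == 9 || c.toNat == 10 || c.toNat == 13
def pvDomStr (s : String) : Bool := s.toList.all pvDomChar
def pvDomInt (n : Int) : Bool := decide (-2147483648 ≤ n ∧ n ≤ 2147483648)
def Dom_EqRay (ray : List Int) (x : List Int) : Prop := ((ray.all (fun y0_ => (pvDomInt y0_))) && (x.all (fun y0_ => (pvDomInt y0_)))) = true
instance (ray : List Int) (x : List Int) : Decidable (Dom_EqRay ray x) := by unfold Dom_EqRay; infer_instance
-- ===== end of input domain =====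

-- B builds each row already calibrated (sign read off ray[0]*x[j] - ray[j]*x[0], the only two
-- nonzero terms of A's dot product), dropping A's ProdEsc helper and its second calibration pass.

-- ===== PORT A =====
def ProdEsc (v1 : List Int) (v2 : List Int) : Int :=
  let n : Int := v1.length
  (PySem.List.pyRange 0 n 1).foldl
    (fun suma i => suma + PySem.List.pyGetD v1 i 0 * PySem.List.pyGetD v2 i 0) 0

def EqRay (ray : List Int) (x : List Int) : List (List Int) :=
  let n : Int := ray.length
  let eq : List (List Int) :=
    (PySem.List.pyRange 1 n 1).foldl (fun eq j =>
      let aux : List Int := []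
      let aux := aux ++ [-(PySem.List.pyGetD ray j 0)]
      let aux := aux ++ (PySem.List.pyRange 0 (j - 1) 1).map (fun _ => (0 : Int))
      let aux := aux ++ [PySem.List.pyGetD ray 0 0]
      let aux := aux ++ (PySem.List.pyRange 0 (n - j - 1) 1).map (fun _ => (0 : Int))
      eq ++ [aux]) []
  (PySem.List.pyRange 0 (eq.length : Int) 1).foldl (fun eq i =>
    let calibre := ProdEsc (PySem.List.pyGetD eq i []) x
    if calibre < 0 then
      PySem.List.pySetD eq i
        ((PySem.List.pyRange 0 ((PySem.List.pyGetD eq i []).length : Int) 1).foldl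
          (fun row j => PySem.List.pySetD row j (-(PySem.List.pyGetD row j 0)))
          (PySem.List.pyGetD eq i []))
    else eq) eq

-- ===== PORT B =====
def EqRay_alt (ray : List Int) (x : List Int) : List (List Int) :=
  let n : Int := ray.length
  (PySem.List.pyRange 1 n 1).map (fun j =>
    let s : Int := PySem.List.pyGetD ray 0 0 * PySem.List.pyGetD x j 0
                   - PySem.List.pyGetD ray j 0 * PySem.List.pyGetD x 0 0
    if s < 0 then
      [PySem.List.pyGetD ray j 0] ++ List.replicate (j - 1).toNat (0 : Int)
        ++ [-(PySem.List.pyGetD ray 0 0)] ++ List.replicate (n - j - 1).toNat (0 : Int)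
    else
      [-(PySem.List.pyGetD ray j 0)] ++ List.replicate (j - 1).toNat (0 : Int)
        ++ [PySem.List.pyGetD ray 0 0] ++ List.replicate (n - j - 1).toNat (0 : Int))


-- ===== PRECONDITION & SPEC =====
-- Pre_ excludes exactly the inputs where Python A raises IndexError: when len(ray) >= 2, A's
-- ProdEsc (and B alike) indexes x up to position len(ray)-1, so x must be at least that long.
def Pre_EqRay (ray : List Int) (x : List Int) : Prop :=
  ray.length ≤ 1 ∨ ray.length ≤ x.length
instance (ray : List Int) (x : List Int) : Decidable (Pre_EqRay ray x) := by
  unfold Pre_EqRay; infer_instance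

def pvWitness_EqRay : List Int × List Int := ([2, 3, 5], [1, 1, 1])

def Spec_EqRay (ray : List Int) (x : List Int) (out : List (List Int)) : Prop := out = EqRay_alt ray x
instance (ray : List Int) (x : List Int) (out : List (List Int)) : Decidable (Spec_EqRay ray x out) := by unfold Spec_EqRay; infer_instance

-- ===== CLAIM (what is proved, stated in full; the proofs are below) =====
def Claim_equal_EqRay : Prop := ∀ (ray : List Int) (x : List Int), Dom_EqRay ray x → Pre_EqRay ray x → Spec_EqRay ray x (EqRay ray x)

-- ===== LEMMAS AND PROOFS =====
lemma pv_zeros (m : Int) :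
    (PySem.List.pyRange 0 m 1).map (fun _ => (0 : Int)) = List.replicate m.toNat 0 := by
  rw [PySem.List.pyRange_one]
  simp [List.map_map]
  have h : ∀ b ∈ List.map ((fun _ => (0:Int)) ∘ fun k : Nat => ((0:Int) + (k:Int))) (List.range m.toNat), b = 0 := by simp
  simpa using List.eq_replicate_of_mem h

lemma pv_set_fold_ite {α : Type} (d : α) (p : α → Prop) [DecidablePred p] (g : α → α) :
    ∀ (todo done : List α),
    (List.range' done.length todo.length).foldl
      (fun l i => if p (l.getD i d) then l.set i (g (l.getD i d)) else l) (done ++ todo)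
    = done ++ todo.map (fun t => if p t then g t else t) := by
  intro todo
  induction todo with
  | nil => simp
  | cons t ts ih =>
    intro done
    rw [List.length_cons, List.range'_succ, List.foldl_cons]
    have hget : (done ++ t :: ts).getD done.length d = t := by
      simp [List.getD]
    have hset : ∀ v, (done ++ t :: ts).set done.length v = done ++ v :: ts := by
      intro v
      rw [List.set_append_right _ _ (le_refl done.length)]
      simp
    simp only [hget]
    by_cases hp : p t
    · rw [if_pos hp, hset]
      have := ih (done ++ [g t])
      simp only [List.length_append, List.length_singleton, List.append_assoc,
        List.singleton_append] at this
      simpa [hp] using this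
    · rw [if_neg hp]
      have := ih (done ++ [t])
      simp only [List.length_append, List.length_singleton, List.append_assoc,
        List.singleton_append] at this
      simpa [hp] using this

lemma pv_neg_fold (row : List Int) :
    (List.range row.length).foldl (fun r j => r.set j (-(r.getD j 0))) row
    = row.map (fun a => -a) := by
  have := pv_set_fold_ite (0 : Int) (fun _ => True) (fun a => -a) row []
  simpa [List.range_eq_range'] using this

lemma prodesc_eq_sum (v x : List Int) :
    ProdEsc v x = ((List.range v.length).map (fun i => v.getD i 0 * x.getD i 0)).sum := by
  unfold ProdEsc
  rw [PySem.List.foldl_add]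
  simp [PySem.List.pyRange_one, List.map_map, Function.comp_def]

lemma pv_prodesc_cons (a : Int) (v x : List Int) :
    ProdEsc (a :: v) x = a * x.getD 0 0 + ProdEsc v x.tail := by
  rw [prodesc_eq_sum, prodesc_eq_sum]
  rw [List.length_cons, List.range_succ_eq_map]
  simp [List.map_map, Function.comp_def, List.getD]

lemma pv_prodesc_zeros (m : Nat) (rest x : List Int) :
    ProdEsc (List.replicate m 0 ++ rest) x = ProdEsc rest (x.drop m) := by
  induction m generalizing x with
  | zero => simp
  | succ k ih =>
    rw [List.replicate_succ, List.cons_append, pv_prodesc_cons, zero_mul, zero_add, ih]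
    rw [← List.drop_one, List.drop_drop, Nat.add_comm]

lemma pv_prodesc_nil (x : List Int) : ProdEsc [] x = 0 := by
  simp [prodesc_eq_sum]

lemma pv_prodesc_repl (k : Nat) (x : List Int) : ProdEsc (List.replicate k 0) x = 0 := by
  have h := pv_prodesc_zeros k [] x
  simpa [pv_prodesc_nil] using h

lemma pv_prodesc_row (a b : Int) (m k : Nat) (x : List Int) :
    ProdEsc ([a] ++ List.replicate m 0 ++ [b] ++ List.replicate k 0) x
    = a * x.getD 0 0 + b * x.getD (m+1) 0 := by
  simp only [List.append_assoc, List.cons_append, List.nil_append]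
  rw [pv_prodesc_cons, pv_prodesc_zeros, pv_prodesc_cons, pv_prodesc_repl]
  rw [← List.drop_one, List.drop_drop]
  simp [List.getD, List.getElem?_drop, Nat.add_comm]

lemma pv_getD_toNat (x : List Int) (j : Int) (hj : 0 ≤ j) (d : Int) :
    PySem.List.pyGetD x j d = x.getD j.toNat d := by
  obtain ⟨n, rfl⟩ := Int.eq_ofNat_of_zero_le hj
  simp [PySem.List.pyGetD_natCast]

theorem pv_main (ray x : List Int) : EqRay ray x = EqRay_alt ray x := by
  unfold EqRay EqRay_alt
  simp only []
  rw [PySem.List.foldl_append_singleton_eq_map]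
  simp only [List.nil_append, pv_zeros]
  rw [PySem.List.pyRange_zero_nat, List.foldl_map]
  simp only [PySem.List.pyGetD_natCast, PySem.List.pySetD_natCast, PySem.List.pyRange_zero_nat,
    List.foldl_map, pv_neg_fold]
  rw [List.range_eq_range']
  have h := pv_set_fold_ite ([] : List Int) (fun row => ProdEsc row x < 0)
      (fun row => row.map (fun a => -a))
      ((PySem.List.pyRange 1 (ray.length : Int) 1).map (fun j =>
        [-(PySem.List.pyGetD ray j 0)] ++ List.replicate (j - 1).toNat (0 : Int)
          ++ [PySem.List.pyGetD ray 0 0] ++ List.replicate ((ray.length : Int) - j - 1).toNat (0 : Int))) []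
  simp only [List.nil_append, List.length_nil] at h
  rw [h, List.map_map]
  apply List.map_congr_left
  intro j hj
  obtain ⟨hj1, hj2⟩ := PySem.List.mem_pyRange_one.mp hj
  simp only [Function.comp_apply]
  have hrow : ProdEsc ([-(PySem.List.pyGetD ray j 0)] ++ List.replicate (j - 1).toNat (0 : Int)
      ++ [PySem.List.pyGetD ray 0 0] ++ List.replicate ((ray.length : Int) - j - 1).toNat (0 : Int)) x
      = PySem.List.pyGetD ray 0 0 * PySem.List.pyGetD x j 0
        - PySem.List.pyGetD ray j 0 * PySem.List.pyGetD x 0 0 := by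
    rw [pv_prodesc_row]
    rw [show (j - 1).toNat + 1 = j.toNat by omega]
    rw [pv_getD_toNat x j (by omega), pv_getD_toNat x 0 (by omega)]
    simp
    ring
  rw [hrow]
  by_cases hs : PySem.List.pyGetD ray 0 0 * PySem.List.pyGetD x j 0
      - PySem.List.pyGetD ray j 0 * PySem.List.pyGetD x 0 0 < 0
  · rw [if_pos hs, if_pos hs]
    simp [List.map_append, List.map_replicate]
  · rw [if_neg hs, if_neg hs]

-- ===== VERDICT (by name: the statement is the Claim_ definition above) =====
theorem EqRay_spec : Claim_equal_EqRay := by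
  intro ray x _ _
  exact pv_main ray x
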